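-- pv_equiv track=rewrite | github.com/NQBH/advanced_STEM_beyond | IT_fundamentals/Python/double_factorial.py | tinh_tong_S
-- ===== SOURCE A (Python) =====
-- def tinh_tong_S(n):
--     S = 0
--     for i in range(1, n + 1):
--         term = double_factorial(i)
--         if i % 2 == 0:
--             S -= term
--         else:
--             S += term
--     return S
--
-- def double_factorial(n):
--     result = 1
--     for i in range(n, 0, -2):
--         result *= i
--     return result
-- ===== SOURCE B (Python) =====
-- def tinh_tong_S(n):
--     # One pass: maintain the running double factorial per parity (df(i) = i * df(i-2)).
--     S = 0
--     odd = 1   # double factorial of the last odd i seen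
--     even = 1  # double factorial of the last even i seen
--     for i in range(1, n + 1):
--         if i % 2 == 0:
--             even *= i
--             S -= even
--         else:
--             odd *= i
--             S += odd
--     return S
-- ===== Notes on version B (the rewrite author's own statement) =====
-- stated objective: faster
-- what changed: B computes each double factorial incrementally from the previous one of the same parity (df(i)=i*df(i-2)) in a single pass, instead of recomputing every double factorial from scratch with an inner loop.
import Mathlib
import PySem

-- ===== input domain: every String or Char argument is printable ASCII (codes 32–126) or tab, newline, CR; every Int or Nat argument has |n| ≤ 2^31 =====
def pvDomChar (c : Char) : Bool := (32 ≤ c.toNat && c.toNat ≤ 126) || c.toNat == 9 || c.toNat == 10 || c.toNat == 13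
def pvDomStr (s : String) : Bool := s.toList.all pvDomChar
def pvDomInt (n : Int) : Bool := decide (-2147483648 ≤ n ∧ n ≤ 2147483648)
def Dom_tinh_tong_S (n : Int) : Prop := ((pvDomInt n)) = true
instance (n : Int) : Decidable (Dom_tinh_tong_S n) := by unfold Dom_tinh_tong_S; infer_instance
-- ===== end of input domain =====

-- B replaces A's per-term inner double-factorial loop by one pass maintaining the running
-- double factorial per parity (df(i) = i * df(i-2)); objective: faster (fewer multiplications).

-- ===== PORT A =====
-- helper: Python double_factorial(n)
def double_factorial (n : Int) : Int :=
  (PySem.List.pyRange n 0 (-2)).foldl (fun result i => result * i) 1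

-- loop body of A
def stepA (S : Int) (i : Int) : Int :=
  let term := double_factorial i
  if PySem.Int.mod i 2 = 0 then S - term else S + term

def tinh_tong_S (n : Int) : Int :=
  (PySem.List.pyRange 1 (n + 1) 1).foldl stepA 0

-- ===== PORT B =====
-- loop body of B; state (S, odd, even)
def stepB (st : Int × Int × Int) (i : Int) : Int × Int × Int :=
  if PySem.Int.mod i 2 = 0 then (st.1 - st.2.2 * i, st.2.1, st.2.2 * i)
  else (st.1 + st.2.1 * i, st.2.1 * i, st.2.2)

def tinh_tong_S_alt (n : Int) : Int :=
  ((PySem.List.pyRange 1 (n + 1) 1).foldl stepB (0, 1, 1)).1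

-- ===== PRECONDITION & SPEC =====
def Spec_tinh_tong_S (n : Int) (out : Int) : Prop := out = tinh_tong_S_alt n
instance (n : Int) (out : Int) : Decidable (Spec_tinh_tong_S n out) := by unfold Spec_tinh_tong_S; infer_instance

-- ===== CLAIM (what is proved, stated in full; the proofs are below) =====
def Claim_equal_tinh_tong_S : Prop := ∀ (n : Int), Dom_tinh_tong_S n → Spec_tinh_tong_S n (tinh_tong_S n)

-- ===== LEMMAS AND PROOFS =====

-- mathematical double factorial, two-step recursion
def ddf : Nat → Int
  | 0 => 1
  | 1 => 1
  | (k+2) => ddf k * (k + 2)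

-- index of the last odd / even number ≤ k (0 if none; ddf 0 = 1 matches the unused init)
def oddIdx (k : Nat) : Nat := if k % 2 = 1 then k else k - 1
def evenIdx (k : Nat) : Nat := if k % 2 = 0 then k else k - 1

theorem ddf_succ (k : Nat) : ddf (k + 1) = ddf (k - 1) * (k + 1) := by
  cases k with
  | zero => simp [ddf]
  | succ m => simp [ddf]; omega

theorem foldl_mul (l : List Int) (x : Int) :
    l.foldl (fun result i => result * i) x = x * l.foldl (fun result i => result * i) 1 := by
  induction l generalizing x with
  | nil => simp
  | cons a t ih => simp only [List.foldl_cons]; rw [ih (x * a), ih (1 * a)]; ring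

theorem pyRange_neg2_cons (a : Int) (h : 0 < a) :
    PySem.List.pyRange a 0 (-2) = a :: PySem.List.pyRange (a - 2) 0 (-2) := by
  rcases (by omega : a = 1 ∨ a = 2 ∨ 2 < a) with rfl | rfl | h3
  · decide
  · decide
  · simp only [PySem.List.pyRange, if_neg (by norm_num : ¬(-2:Int) = 0),
      if_neg (by norm_num : ¬(0:Int) < -2), if_pos (by omega : (0:Int) < a),
      if_pos (by omega : (0:Int) < a - 2)]
    have e1 : a - 0 + - -2 - 1 = a + 1 := by ring
    have e2 : a - 2 - 0 + - -2 - 1 = a - 1 := by ring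
    have e3 : (- -2 : Int) = 2 := by norm_num
    rw [e1, e2, e3]
    have hc : (a + 1) / 2 = (a - 1) / 2 + 1 := by omega
    have h2 : ((a - 1) / 2 + 1).toNat = ((a - 1) / 2).toNat + 1 := by omega
    rw [hc, h2, List.range_succ_eq_map]
    simp only [List.map_cons, Nat.cast_zero, mul_zero, add_zero, List.map_map, List.cons.injEq]
    refine ⟨trivial, ?_⟩
    apply List.map_congr_left
    intro k _
    simp [Function.comp]
    ring

theorem df_eq (k : Nat) : double_factorial (k : Int) = ddf k := by
  induction k using ddf.induct with
  | case1 => decide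
  | case2 => decide
  | case3 k ih =>
    unfold double_factorial
    rw [pyRange_neg2_cons _ (by push_cast; omega)]
    rw [List.foldl_cons, foldl_mul]
    have e : ((k:Int) + 1 + 1) - 2 = (k : Int) := by ring
    push_cast
    rw [e]
    unfold double_factorial at ih
    rw [ih]
    simp [ddf]
    ring

-- the joint loop invariant: B's state carries A's running sum plus the two running double factorials
theorem inv (k : Nat) :
    (PySem.List.pyRange 1 ((k : Int) + 1) 1).foldl stepB (0, 1, 1) =
      ((PySem.List.pyRange 1 ((k : Int) + 1) 1).foldl stepA 0, ddf (oddIdx k), ddf (evenIdx k)) := by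
  induction k with
  | zero =>
    rw [PySem.List.pyRange_one_eq_nil (by omega)]
    simp [oddIdx, evenIdx, ddf]
  | succ m ih =>
    have hsplit : PySem.List.pyRange 1 (((m + 1 : Nat) : Int) + 1) 1
        = PySem.List.pyRange 1 ((m : Int) + 1) 1 ++ [(m : Int) + 1] := by
      push_cast
      exact PySem.List.pyRange_one_succ_right (by omega)
    rw [hsplit, List.foldl_append, List.foldl_append, ih]
    simp only [List.foldl_cons, List.foldl_nil]
    have hcast : ((m : Int) + 1) = (((m + 1 : Nat)) : Int) := by push_cast; ring
    unfold stepA stepB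
    simp only [PySem.Int.mod_eq_emod_of_pos (by norm_num : (0:Int) < 2)]
    rcases Nat.mod_two_eq_zero_or_one m with hm | hm
    · -- m even, so i = m+1 is odd
      rw [if_neg (by omega), if_neg (by omega)]
      have h1 : oddIdx (m + 1) = m + 1 := by simp [oddIdx]; omega
      have h2 : evenIdx (m + 1) = m := by simp [evenIdx]; omega
      have h3 : oddIdx m = m - 1 := by simp [oddIdx]; omega
      have h4 : evenIdx m = m := by simp [evenIdx, hm]
      rw [h1, h2, h3, h4, hcast, df_eq, ddf_succ]
      simp only [Prod.mk.injEq]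
      refine ⟨?_, ?_, ?_⟩ <;> first | trivial | (push_cast; ring)
    · -- m odd, so i = m+1 is even
      rw [if_pos (by omega), if_pos (by omega)]
      have h1 : oddIdx (m + 1) = m := by simp [oddIdx]; omega
      have h2 : evenIdx (m + 1) = m + 1 := by simp [evenIdx]; omega
      have h3 : oddIdx m = m := by simp [oddIdx, hm]
      have h4 : evenIdx m = m - 1 := by simp [evenIdx]; omega
      rw [h1, h2, h3, h4, hcast, df_eq, ddf_succ]
      simp only [Prod.mk.injEq]
      refine ⟨?_, ?_, ?_⟩ <;> first | trivial | (push_cast; ring)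

-- ===== VERDICT (by name: the statement is the Claim_ definition above) =====
theorem tinh_tong_S_spec : Claim_equal_tinh_tong_S := by
  intro n _
  unfold Spec_tinh_tong_S tinh_tong_S tinh_tong_S_alt
  by_cases h : n ≤ 0
  · rw [PySem.List.pyRange_one_eq_nil (by omega)]
    simp
  · have hk : n = ((n.toNat : Int)) := by omega
    rw [hk, inv n.toNat]
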